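-- pv_equiv track=rewrite | github.com/nganguyen1234/Anomalies-Detection-in-Knowledge-Graph | pattern_stats.py | extract_type_patterns
-- ===== SOURCE A (Python) =====
-- from collections import defaultdict
--
-- def extract_type_patterns(triples, subj_types, obj_types):
--     pattern_counts = defaultdict(int)
--     pattern_examples = defaultdict(list)
--     for s, p, o in triples:
--         if p == 'rdf:type':
--             continue
--         s_labels = subj_types.get(s, [])
--         o_labels = obj_types.get(o, [])
--         for stype in s_labels:
--             for otype in o_labels:
--                 pattern = (stype, p, otype)
--                 pattern_counts[pattern] += 1
--                 if len(pattern_examples[pattern]) < 3: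
--                     pattern_examples[pattern].append((s, p, o))
--     return pattern_counts, pattern_examples
-- ===== SOURCE B (Python) =====
-- from collections import defaultdict
--
-- def extract_type_patterns(triples, subj_types, obj_types):
--     # Stage 1: flatten into a stream of (pattern, example) occurrences.
--     occ = [((stype, p, otype), (s, p, o))
--            for s, p, o in triples if p != 'rdf:type'
--            for stype in subj_types.get(s, [])
--            for otype in obj_types.get(o, [])]
--     # Stage 2: distinct patterns in first-encounter order.
--     order = []
--     for pat, _ in occ:
--         if pat not in order:
--             order.append(pat)
--     # Stage 3: one scan of the occurrence stream per distinct pattern.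
--     pattern_counts = defaultdict(int)
--     pattern_examples = defaultdict(list)
--     for pat in order:
--         exs = [ex for q, ex in occ if q == pat]
--         pattern_counts[pat] = len(exs)
--         pattern_examples[pat] = exs[:3]
--     return pattern_counts, pattern_examples
-- ===== Notes on version B (the rewrite author's own statement) =====
-- stated objective: alternative
-- what changed: B replaces A's single incremental pass (maintaining count and capped example list per pattern inside nested loops) by three stages: flatten the input into a (pattern, example) occurrence stream, dedupe patterns in first-encounter order, then rescan the stream once per distinct pattern to fill counts (len) and examples ([:3]).
import Mathlib
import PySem

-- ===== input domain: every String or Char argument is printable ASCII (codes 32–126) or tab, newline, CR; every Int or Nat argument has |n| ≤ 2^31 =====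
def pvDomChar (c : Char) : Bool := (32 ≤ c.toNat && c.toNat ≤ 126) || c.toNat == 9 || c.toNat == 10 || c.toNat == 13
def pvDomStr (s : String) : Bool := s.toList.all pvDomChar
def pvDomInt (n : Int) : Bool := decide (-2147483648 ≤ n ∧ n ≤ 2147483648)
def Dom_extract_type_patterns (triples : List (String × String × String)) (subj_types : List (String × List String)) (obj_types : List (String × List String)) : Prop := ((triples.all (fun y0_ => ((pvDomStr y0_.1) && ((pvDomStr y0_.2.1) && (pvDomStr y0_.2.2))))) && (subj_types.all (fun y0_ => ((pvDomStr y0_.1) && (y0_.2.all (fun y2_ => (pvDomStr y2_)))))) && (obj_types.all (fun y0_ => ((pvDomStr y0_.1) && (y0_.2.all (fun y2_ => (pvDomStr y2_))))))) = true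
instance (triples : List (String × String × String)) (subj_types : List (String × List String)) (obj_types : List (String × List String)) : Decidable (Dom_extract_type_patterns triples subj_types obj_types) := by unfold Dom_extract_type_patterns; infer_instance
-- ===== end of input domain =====

-- B replaces A's single incremental pass (two dicts maintained per occurrence) by three stages:
-- flatten to a (pattern, example) occurrence stream, dedupe the patterns in encounter order,
-- then rescan the stream once per distinct pattern (objective: alternative; not faster).

-- dict.get(k, []) on the association list (first match, per the type convention)
def pvLookup (d : List (String × List String)) (k : String) : List String :=
  match d.find? (fun kv => kv.1 == k) with
  | some kv => kv.2
  | none => []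

-- ===== PORT A =====
-- loop body of A's 'for s, p, o in triples' (state: the pair of dicts pattern_counts, pattern_examples)
def aStep (subj_types : List (String × List String)) (obj_types : List (String × List String))
    (st : PySem.Dict (String × String × String) Int × PySem.Dict (String × String × String) (List (String × String × String)))
    (t : String × String × String) :
    PySem.Dict (String × String × String) Int × PySem.Dict (String × String × String) (List (String × String × String)) :=
  if t.2.1 == "rdf:type" then st else
  (pvLookup subj_types t.1).foldl (fun st stype =>
    (pvLookup obj_types t.2.2).foldl (fun st otype =>
      (st.1.insert (stype, t.2.1, otype) (st.1.getD (stype, t.2.1, otype) 0 + 1),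
       st.2.insert (stype, t.2.1, otype)
         (if (st.2.getD (stype, t.2.1, otype) []).length < 3
          then st.2.getD (stype, t.2.1, otype) [] ++ [(t.1, t.2.1, t.2.2)]
          else st.2.getD (stype, t.2.1, otype) []))) st) st

def extract_type_patterns (triples : List (String × String × String)) (subj_types : List (String × List String)) (obj_types : List (String × List String)) : (List (String × String × String × Int)) × (List (String × String × String × List (String × String × String))) :=
  let st := triples.foldl (aStep subj_types obj_types) (PySem.Dict.empty, PySem.Dict.empty)
  (st.1.items.map (fun kv => (kv.1.1, kv.1.2.1, kv.1.2.2, kv.2)),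
   st.2.items.map (fun kv => (kv.1.1, kv.1.2.1, kv.1.2.2, kv.2)))

-- ===== PORT B =====
-- Stage 1 of Source B: the (pattern, example) occurrence stream (the nested comprehension)
def pvOcc (triples : List (String × String × String)) (subj_types : List (String × List String)) (obj_types : List (String × List String)) :
    List ((String × String × String) × (String × String × String)) :=
  triples.flatMap (fun t =>
    if t.2.1 == "rdf:type" then [] else
    (pvLookup subj_types t.1).flatMap (fun stype =>
      (pvLookup obj_types t.2.2).map (fun otype => ((stype, t.2.1, otype), (t.1, t.2.1, t.2.2)))))

def extract_type_patterns_alt (triples : List (String × String × String)) (subj_types : List (String × List String)) (obj_types : List (String × List String)) : (List (String × String × String × Int)) × (List (String × String × String × List (String × String × String))) :=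
  let occ := pvOcc triples subj_types obj_types
  -- Stage 2: distinct patterns in first-encounter order ('if pat not in order: order.append(pat)')
  let order := occ.foldl (fun ord kv => if ord.contains kv.1 then ord else ord ++ [kv.1]) []
  -- Stage 3: one scan of occ per distinct pattern, filling the two result dicts
  let st := order.foldl (fun st pat =>
      let exs := (occ.filter (fun q => q.1 == pat)).map Prod.snd
      (st.1.insert pat (exs.length : Int), st.2.insert pat (exs.take 3)))
    (PySem.Dict.empty, PySem.Dict.empty)
  (st.1.items.map (fun kv => (kv.1.1, kv.1.2.1, kv.1.2.2, kv.2)),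
   st.2.items.map (fun kv => (kv.1.1, kv.1.2.1, kv.1.2.2, kv.2)))

-- ===== PRECONDITION & SPEC =====
def Spec_extract_type_patterns (triples : List (String × String × String)) (subj_types : List (String × List String)) (obj_types : List (String × List String)) (out : (List (String × String × String × Int)) × (List (String × String × String × List (String × String × String)))) : Prop := out = extract_type_patterns_alt triples subj_types obj_types
instance (triples : List (String × String × String)) (subj_types : List (String × List String)) (obj_types : List (String × List String)) (out : (List (String × String × String × Int)) × (List (String × String × String × List (String × String × String)))) : Decidable (Spec_extract_type_patterns triples subj_types obj_types out) := by
  unfold Spec_extract_type_patterns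
  haveI h1 : DecidableEq (List (String × String × String)) := inferInstance
  infer_instance

-- ===== CLAIM (what is proved, stated in full; the proofs are below) =====
def Claim_equal_extract_type_patterns : Prop := ∀ (triples : List (String × String × String)) (subj_types : List (String × List String)) (obj_types : List (String × List String)), Dom_extract_type_patterns triples subj_types obj_types → Spec_extract_type_patterns triples subj_types obj_types (extract_type_patterns triples subj_types obj_types)

-- ===== LEMMAS AND PROOFS =====

-- the grouping dict pattern → all its examples (proof device relating the two ports)
def gStep (subj_types : List (String × List String)) (obj_types : List (String × List String))
    (g : PySem.Dict (String × String × String) (List (String × String × String)))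
    (t : String × String × String) :
    PySem.Dict (String × String × String) (List (String × String × String)) :=
  if t.2.1 == "rdf:type" then g else
  (pvLookup subj_types t.1).foldl (fun g stype =>
    (pvLookup obj_types t.2.2).foldl (fun g otype =>
      g.insert (stype, t.2.1, otype) (g.getD (stype, t.2.1, otype) [] ++ [(t.1, t.2.1, t.2.2)])) g) g

-- invariant: A's pair of dicts is the pointwise image (length, take 3) of the grouping dict
def pvRel (g : PySem.Dict (String × String × String) (List (String × String × String)))
    (st : PySem.Dict (String × String × String) Int × PySem.Dict (String × String × String) (List (String × String × String))) : Prop :=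
  g.keys.Nodup ∧
  st.1.items = g.items.map (fun kv => (kv.1, (kv.2.length : Int))) ∧
  st.2.items = g.items.map (fun kv => (kv.1, kv.2.take 3))

theorem pv_take3_append {α : Type} (v : List α) (t : α) :
    (v ++ [t]).take 3 = if (v.take 3).length < 3 then v.take 3 ++ [t] else v.take 3 := by
  by_cases h : v.length < 3
  · rw [if_pos (by simp [List.length_take]; omega)]
    rw [List.take_of_length_le (show (v ++ [t]).length ≤ 3 by simp; omega),
        List.take_of_length_le (show v.length ≤ 3 by omega)]
  · rw [if_neg (by simp [List.length_take]; omega)]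
    exact List.take_append_of_le_length (by omega)

theorem pv_foldl_rel {α β γ : Type} (R : β → γ → Prop) (f : β → α → β) (f' : γ → α → γ)
    (h : ∀ b c a, R b c → R (f b a) (f' c a)) :
    ∀ (l : List α) (b : β) (c : γ), R b c → R (l.foldl f b) (l.foldl f' c) := by
  intro l
  induction l with
  | nil => intro b c hr; exact hr
  | cons x xs ih => intro b c hr; exact ih _ _ (h b c x hr)

theorem pv_step_rel (g : PySem.Dict (String × String × String) (List (String × String × String)))
    (st : PySem.Dict (String × String × String) Int × PySem.Dict (String × String × String) (List (String × String × String)))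
    (pat t : String × String × String) (h : pvRel g st) :
    pvRel (g.insert pat (g.getD pat [] ++ [t]))
      (st.1.insert pat (st.1.getD pat 0 + 1),
       st.2.insert pat (if (st.2.getD pat []).length < 3 then st.2.getD pat [] ++ [t] else st.2.getD pat [])) := by
  obtain ⟨hnd, hc, he⟩ := h
  have hkc : st.1.keys = g.keys := by
    simp only [PySem.Dict.keys, hc, List.map_map]; rfl
  have hke : st.2.keys = g.keys := by
    simp only [PySem.Dict.keys, he, List.map_map]; rfl
  have hcc : st.1.contains pat = g.contains pat := by
    rw [PySem.Dict.contains_eq_decide_mem_keys, PySem.Dict.contains_eq_decide_mem_keys, hkc]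
  have hce : st.2.contains pat = g.contains pat := by
    rw [PySem.Dict.contains_eq_decide_mem_keys, PySem.Dict.contains_eq_decide_mem_keys, hke]
  refine ⟨PySem.Dict.nodup_keys_insert _ _ _ hnd, ?_, ?_⟩
  all_goals cases hg : g.contains pat
  -- pattern not yet present: all three dicts append
  · rw [PySem.Dict.items_insert_of_not_contains _ _ (hcc.trans hg),
        PySem.Dict.items_insert_of_not_contains _ _ hg,
        PySem.Dict.getD_of_not_contains _ _ (hcc.trans hg),
        PySem.Dict.getD_of_not_contains _ _ hg, hc]
    simp
  -- pattern present: all three dicts overwrite in place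
  · have hv : ∃ v, g.get? pat = some v := by
      have := PySem.Dict.contains_eq_isSome_get? g pat
      rw [hg] at this; exact Option.isSome_iff_exists.mp this.symm
    obtain ⟨v, hv⟩ := hv
    have hgv : g.getD pat [] = v := PySem.Dict.getD_of_get?_eq_some _ _ hv
    have hmem : (pat, v) ∈ g.items := PySem.Dict.mem_items_of_get?_eq_some _ hv
    have hcv : st.1.getD pat 0 = (v.length : Int) := by
      refine PySem.Dict.getD_of_mem_items st.1 ?_ (by rw [hkc]; exact hnd) 0
      rw [hc]; exact List.mem_map_of_mem hmem
    rw [PySem.Dict.items_insert_of_contains _ _ (hcc.trans hg),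
        PySem.Dict.items_insert_of_contains _ _ hg, hc,
        List.map_map, List.map_map, hcv, hgv]
    refine List.map_congr_left ?_
    intro q hq
    by_cases hq1 : q.1 = pat
    · simp [Function.comp, hq1]
    · simp [Function.comp, hq1]
  · rw [PySem.Dict.items_insert_of_not_contains _ _ (hce.trans hg),
        PySem.Dict.items_insert_of_not_contains _ _ hg,
        PySem.Dict.getD_of_not_contains _ _ (hce.trans hg),
        PySem.Dict.getD_of_not_contains _ _ hg, he]
    simp
  · have hv : ∃ v, g.get? pat = some v := by
      have := PySem.Dict.contains_eq_isSome_get? g pat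
      rw [hg] at this; exact Option.isSome_iff_exists.mp this.symm
    obtain ⟨v, hv⟩ := hv
    have hgv : g.getD pat [] = v := PySem.Dict.getD_of_get?_eq_some _ _ hv
    have hmem : (pat, v) ∈ g.items := PySem.Dict.mem_items_of_get?_eq_some _ hv
    have hev : st.2.getD pat [] = v.take 3 := by
      refine PySem.Dict.getD_of_mem_items st.2 ?_ (by rw [hke]; exact hnd) []
      rw [he]; exact List.mem_map_of_mem hmem
    rw [PySem.Dict.items_insert_of_contains _ _ (hce.trans hg),
        PySem.Dict.items_insert_of_contains _ _ hg, he,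
        List.map_map, List.map_map, hev, hgv]
    refine List.map_congr_left ?_
    intro q hq
    by_cases hq1 : q.1 = pat
    · simp [Function.comp, hq1, pv_take3_append]
    · simp [Function.comp, hq1]

theorem pv_gStep_rel (subj_types obj_types : List (String × List String))
    (g : PySem.Dict (String × String × String) (List (String × String × String)))
    (st : PySem.Dict (String × String × String) Int × PySem.Dict (String × String × String) (List (String × String × String)))
    (t : String × String × String) (h : pvRel g st) :
    pvRel (gStep subj_types obj_types g t) (aStep subj_types obj_types st t) := by
  unfold aStep gStep
  split_ifs
  · exact h
  · refine pv_foldl_rel pvRel _ _ ?_ _ _ _ h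
    intro g st stype hr
    refine pv_foldl_rel pvRel _ _ ?_ _ _ _ hr
    intro g st otype hr
    exact pv_step_rel g st (stype, t.2.1, otype) (t.1, t.2.1, t.2.2) hr

theorem pv_fold_rel (triples : List (String × String × String)) (subj_types obj_types : List (String × List String)) :
    pvRel (triples.foldl (gStep subj_types obj_types) PySem.Dict.empty)
          (triples.foldl (aStep subj_types obj_types) (PySem.Dict.empty, PySem.Dict.empty)) := by
  refine pv_foldl_rel pvRel _ _ (pv_gStep_rel subj_types obj_types) triples _ _ ?_
  refine ⟨?_, ?_, ?_⟩ <;> simp [PySem.Dict.keys, PySem.Dict.empty]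

-- the grouping fold over triples is the flat append-fold over the occurrence stream
theorem pv_g_eq_occ_fold (triples : List (String × String × String)) (subj_types obj_types : List (String × List String)) :
    triples.foldl (gStep subj_types obj_types) PySem.Dict.empty =
      (pvOcc triples subj_types obj_types).foldl
        (fun d p => d.modify p.1 [] (· ++ [p.2])) PySem.Dict.empty := by
  rw [pvOcc, List.foldl_flatMap]
  refine List.foldl_ext _ _ _ (fun g t _ => ?_)
  unfold gStep
  by_cases h : t.2.1 == "rdf:type"
  · simp [h]
  · rw [if_neg h, if_neg h, List.foldl_flatMap]
    refine List.foldl_ext _ _ _ (fun g stype _ => ?_)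
    rw [List.foldl_map]
    rfl

-- characterisation of the append-fold: keys and per-key contents
theorem pv_occfold_getD (occ : List ((String × String × String) × (String × String × String))) (pat : String × String × String) :
    ((occ.foldl (fun d p => d.modify p.1 [] (· ++ [p.2])) PySem.Dict.empty).getD pat []) =
      (occ.filter (fun q => q.1 == pat)).map Prod.snd := by
  rw [PySem.Dict.getD_foldl_modify_append]
  simp [PySem.Dict.getD_empty]

theorem pv_occfold_keys (occ : List ((String × String × String) × (String × String × String))) :
    (occ.foldl (fun d p => d.modify p.1 [] (· ++ [p.2])) PySem.Dict.empty).keys =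
      PySem.Set.ofList (occ.map Prod.fst) := by
  rw [PySem.Dict.keys_foldl_modify_key]
  simp [PySem.Dict.keys_empty, PySem.Set.update_nil_left]

-- B's dedupe loop is Set.ofList of the pattern stream
theorem pv_order_eq (occ : List ((String × String × String) × (String × String × String))) :
    occ.foldl (fun ord kv => if ord.contains kv.1 then ord else ord ++ [kv.1]) [] =
      PySem.Set.ofList (occ.map Prod.fst) := by
  have : (fun (ord : List (String × String × String)) (kv : (String × String × String) × (String × String × String)) =>
      if ord.contains kv.1 then ord else ord ++ [kv.1]) =
      (fun ord kv => PySem.Set.add ord kv.1) := rfl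
  rw [this, ← PySem.Set.update_map_eq_foldl_add, PySem.Set.update_nil_left]

-- ===== VERDICT (by name: the statement is the Claim_ definition above) =====
theorem extract_type_patterns_spec : Claim_equal_extract_type_patterns := by
  intro triples subj_types obj_types _
  obtain ⟨hnd, hc, he⟩ := pv_fold_rel triples subj_types obj_types
  have hget : ∀ pat, ((triples.foldl (gStep subj_types obj_types) PySem.Dict.empty).getD pat []) =
      ((pvOcc triples subj_types obj_types).filter (fun q => q.1 == pat)).map Prod.snd := by
    intro pat; rw [pv_g_eq_occ_fold, pv_occfold_getD]
  have hitems : (triples.foldl (gStep subj_types obj_types) PySem.Dict.empty).items =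
      (PySem.Set.ofList ((pvOcc triples subj_types obj_types).map Prod.fst)).map
        (fun k => (k, ((pvOcc triples subj_types obj_types).filter (fun q => q.1 == k)).map Prod.snd)) := by
    rw [PySem.Dict.items_eq_map_keys _ hnd [], pv_g_eq_occ_fold, pv_occfold_keys]
    refine List.map_congr_left (fun k _ => ?_)
    rw [← pv_g_eq_occ_fold, hget k]
  have hfresh : ∀ a ∈ PySem.Set.ofList ((pvOcc triples subj_types obj_types).map Prod.fst),
      (PySem.Dict.empty : PySem.Dict (String × String × String) Int).contains a = false := by
    intro a _; exact PySem.Dict.contains_empty a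
  have hfresh2 : ∀ a ∈ PySem.Set.ofList ((pvOcc triples subj_types obj_types).map Prod.fst),
      (PySem.Dict.empty : PySem.Dict (String × String × String) (List (String × String × String))).contains a = false := by
    intro a _; exact PySem.Dict.contains_empty a
  have hndo : ((PySem.Set.ofList ((pvOcc triples subj_types obj_types).map Prod.fst)).map (fun (k : String × String × String) => k)).Nodup := by
    simp only [List.map_id_fun', id]
    exact PySem.Set.nodup_ofList ((pvOcc triples subj_types obj_types).map Prod.fst)
  show ((triples.foldl (aStep subj_types obj_types) (PySem.Dict.empty, PySem.Dict.empty)).1.items.map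
          (fun kv => (kv.1.1, kv.1.2.1, kv.1.2.2, kv.2)),
        (triples.foldl (aStep subj_types obj_types) (PySem.Dict.empty, PySem.Dict.empty)).2.items.map
          (fun kv => (kv.1.1, kv.1.2.1, kv.1.2.2, kv.2))) =
       ((((pvOcc triples subj_types obj_types).foldl (fun ord kv => if ord.contains kv.1 then ord else ord ++ [kv.1]) []).foldl
            (fun (st : PySem.Dict (String × String × String) Int × PySem.Dict (String × String × String) (List (String × String × String))) pat =>
              (st.1.insert pat ((((pvOcc triples subj_types obj_types).filter (fun q => q.1 == pat)).map Prod.snd).length : Int),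
               st.2.insert pat ((((pvOcc triples subj_types obj_types).filter (fun q => q.1 == pat)).map Prod.snd).take 3)))
            (PySem.Dict.empty, PySem.Dict.empty)).1.items.map (fun kv => (kv.1.1, kv.1.2.1, kv.1.2.2, kv.2)),
        (((pvOcc triples subj_types obj_types).foldl (fun ord kv => if ord.contains kv.1 then ord else ord ++ [kv.1]) []).foldl
            (fun (st : PySem.Dict (String × String × String) Int × PySem.Dict (String × String × String) (List (String × String × String))) pat =>
              (st.1.insert pat ((((pvOcc triples subj_types obj_types).filter (fun q => q.1 == pat)).map Prod.snd).length : Int),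
               st.2.insert pat ((((pvOcc triples subj_types obj_types).filter (fun q => q.1 == pat)).map Prod.snd).take 3)))
            (PySem.Dict.empty, PySem.Dict.empty)).2.items.map (fun kv => (kv.1.1, kv.1.2.1, kv.1.2.2, kv.2)))
  rw [hc, he, hitems, pv_order_eq,
      PySem.List.foldl_prod_mk
        (f := fun (d : PySem.Dict (String × String × String) Int) pat =>
          d.insert pat (((((pvOcc triples subj_types obj_types).filter (fun q => q.1 == pat)).map Prod.snd).length : Int)))
        (g := fun (d : PySem.Dict (String × String × String) (List (String × String × String))) pat =>
          d.insert pat ((((pvOcc triples subj_types obj_types).filter (fun q => q.1 == pat)).map Prod.snd).take 3)),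
      PySem.Dict.items_foldl_insert_fresh
        (PySem.Set.ofList ((pvOcc triples subj_types obj_types).map Prod.fst)) (fun k => k)
        (fun pat => ((((pvOcc triples subj_types obj_types).filter (fun q => q.1 == pat)).map Prod.snd).length : Int))
        PySem.Dict.empty hfresh hndo,
      PySem.Dict.items_foldl_insert_fresh
        (PySem.Set.ofList ((pvOcc triples subj_types obj_types).map Prod.fst)) (fun k => k)
        (fun pat => (((pvOcc triples subj_types obj_types).filter (fun q => q.1 == pat)).map Prod.snd).take 3)
        PySem.Dict.empty hfresh2 hndo]
  simp [List.map_map, Function.comp_def, PySem.Dict.empty]
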